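-- pv_equiv track=rewrite | github.com/aerovfx/Fullstack4kid | APPENDIX_A/Python/PythonStudy/Baochau/de44/DAYFIBO_V1.PY | is_fibonacci_string
-- ===== SOURCE A (Python) =====
-- def is_fibonacci_string(s):
--     # Kiểm tra xâu có ít nhất 3 ký tự trở lên
--     if len(s) < 3:
--         return False
--
--     # Kiểm tra xâu có bắt đầu bằng 0, 1
--     if s[:2] != '01':
--         return False
--
--     # Duyệt từ ký tự thứ 2 trở đi và kiểm tra tính chất của chuỗi Fibonacci
--     a, b = 0, 1
--     i = 2
--     while i < len(s):
--         fib_sum = a + b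
--         if s[i:i + len(str(fib_sum))] != str(fib_sum):
--             return False
--         a, b = b, fib_sum
--         i += len(str(fib_sum))
--
--     return True
-- ===== SOURCE B (Python) =====
-- def is_fibonacci_string(s):
--     # Build the canonical Fibonacci concatenation up to len(s), then compare once.
--     t = '01'
--     a, b = 0, 1
--     while len(t) < len(s):
--         t += str(a + b)
--         a, b = b, a + b
--     return len(s) >= 3 and t == s
-- ===== Notes on version B (the rewrite author's own statement) =====
-- stated objective: alternative
-- what changed: Instead of A's index-walking loop that slices the input block-by-block and compares each slice to the next Fibonacci number's decimal string, B constructs the canonical Fibonacci concatenation string until it is at least as long as the input and finishes with one length-guarded equality comparison.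
import Mathlib
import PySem

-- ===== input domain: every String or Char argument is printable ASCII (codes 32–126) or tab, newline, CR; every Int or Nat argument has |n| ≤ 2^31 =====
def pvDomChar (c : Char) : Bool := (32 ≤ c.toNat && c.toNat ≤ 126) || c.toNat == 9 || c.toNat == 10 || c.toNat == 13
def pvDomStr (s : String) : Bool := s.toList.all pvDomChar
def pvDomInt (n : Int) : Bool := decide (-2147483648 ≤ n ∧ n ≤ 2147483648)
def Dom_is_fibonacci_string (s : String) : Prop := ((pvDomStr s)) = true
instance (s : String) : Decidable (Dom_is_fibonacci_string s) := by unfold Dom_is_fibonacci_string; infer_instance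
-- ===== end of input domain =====

-- B replaces A's block-by-block slice checks by constructing the canonical Fibonacci
-- concatenation once and comparing it to s (objective: alternative decomposition, same cost).

-- str(n) is never the empty string (needed for termination of both loops).
theorem pvToDigitsCore_length_lt (b : Nat) : ∀ (f n : Nat) (acc : List Char),
    acc.length < (Nat.toDigitsCore b (f + 1) n acc).length := by
  intro f
  induction f with
  | zero =>
    intro n acc
    simp only [Nat.toDigitsCore]
    split <;> simp
  | succ f ih =>
    intro n acc
    simp only [Nat.toDigitsCore]
    split
    · simp
    · exact Nat.lt_trans (by simp) (ih (n / b) _)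

theorem pvToChars_length_pos (n : Int) : 0 < (PySem.Int.toChars n).length := by
  unfold PySem.Int.toChars
  split
  · simp
  · exact Nat.lt_of_le_of_lt (Nat.zero_le _) (pvToDigitsCore_length_lt 10 _ _ [])

-- ===== PORT A =====
-- A's while loop: a, b are the running Fibonacci pair; i walks the string in blocks.
-- (i is a Nat: in A it starts at 2 and only grows, so it is always a nonnegative index.)
def pvLoopA (s : List Char) (a b : Int) (i : Nat) : Bool :=
  if i < s.length then
    let fib_sum := a + b
    let d := PySem.Int.toChars fib_sum
    if PySem.List.slice s (some (i : Int)) (some ((i : Int) + (d.length : Int))) = d then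
      pvLoopA s b fib_sum (i + d.length)
    else false
  else true
termination_by s.length - i
decreasing_by
  have := pvToChars_length_pos (a + b)
  omega

def is_fibonacci_string (s : String) : Bool :=
  let cs := s.toList
  if cs.length < 3 then false
  else if PySem.List.slice cs none (some 2) ≠ ['0', '1'] then false
  else pvLoopA cs 0 1 2

-- ===== PORT B =====
-- B's while loop: append str(a+b) to t until len(t) >= len(s); returns the built t.
def pvBuildB (s t : List Char) (a b : Int) : List Char :=
  if t.length < s.length then
    pvBuildB s (t ++ PySem.Int.toChars (a + b)) b (a + b)
  else t
termination_by s.length - t.length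
decreasing_by
  have := pvToChars_length_pos (a + b)
  simp only [List.length_append]
  omega

def is_fibonacci_string_alt (s : String) : Bool :=
  let cs := s.toList
  let t := pvBuildB cs ['0', '1'] 0 1
  decide (3 ≤ cs.length) && decide (t = cs)

-- ===== PRECONDITION & SPEC =====
def Spec_is_fibonacci_string (s : String) (out : Bool) : Prop := out = is_fibonacci_string_alt s
instance (s : String) (out : Bool) : Decidable (Spec_is_fibonacci_string s out) := by unfold Spec_is_fibonacci_string; infer_instance

-- ===== CLAIM (what is proved, stated in full; the proofs are below) =====
def Claim_equal_is_fibonacci_string : Prop := ∀ (s : String), Dom_is_fibonacci_string s → Spec_is_fibonacci_string s (is_fibonacci_string s)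

-- ===== LEMMAS AND PROOFS =====

-- the initial t is a prefix of whatever pvBuildB builds
theorem pvBuildB_prefix (s : List Char) : ∀ (t : List Char) (a b : Int),
    t <+: pvBuildB s t a b := by
  intro t a b
  rw [pvBuildB]
  split
  · exact List.IsPrefix.trans (List.prefix_append t _) (pvBuildB_prefix s _ b (a + b))
  · exact List.prefix_refl t
termination_by t => s.length - t.length
decreasing_by
  have := pvToChars_length_pos (a + b)
  simp only [List.length_append]
  omega

-- main invariant: positioned at a block boundary i (so s.take i is the text matched
-- so far = the text built so far), A's scanning loop succeeds iff B's built string is s.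
theorem pvLoop_eq (s : List Char) : ∀ (k i : Nat) (a b : Int),
    s.length - i ≤ k → i ≤ s.length →
    (pvLoopA s a b i = true ↔ pvBuildB s (s.take i) a b = s) := by
  intro k
  induction k with
  | zero =>
    intro i a b hk hi
    have hi' : i = s.length := by omega
    rw [pvLoopA, pvBuildB]
    subst hi'
    simp
  | succ k ih =>
    intro i a b hk hi
    by_cases hlt : i < s.length
    · rw [pvLoopA, pvBuildB]
      have hti : (s.take i).length = i := by simp; omega
      simp only [hlt, if_pos, hti]
      set d := PySem.Int.toChars (a + b) with hd
      have hdpos : 0 < d.length := pvToChars_length_pos (a + b)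
      have hslice : PySem.List.slice s (some (i : Int)) (some ((i : Int) + (d.length : Int)))
          = (s.drop i).take d.length := PySem.List.slice_natCast_add s i d.length
      by_cases hmatch : PySem.List.slice s (some (i : Int)) (some ((i : Int) + (d.length : Int))) = d
      · -- block matches: it is a full block, so step both loops
        have hblk : (s.drop i).take d.length = d := by rw [← hslice, hmatch]
        have hlen : i + d.length ≤ s.length := by
          have := congrArg List.length hblk
          simp at this
          omega
        have htake : s.take (i + d.length) = s.take i ++ d := by
          rw [List.take_add, hblk]
        rw [if_pos hmatch, ← htake]
        exact ih (i + d.length) b (a + b) (by omega) hlen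
      · -- mismatch: A returns False; B's built string extends s.take i ++ d, which is
        -- not a prefix of s, so it cannot equal s
        rw [if_neg hmatch]
        refine iff_of_false (by simp) ?_
        intro habs
        have hpre : s.take i ++ d <+: s := by
          have h := pvBuildB_prefix s (s.take i ++ d) b (a + b)
          rwa [habs] at h
        have hlen2 : i + d.length ≤ s.length := by
          have := hpre.length_le
          simp at this
          omega
        have : s.take i ++ d = s.take (i + d.length) := by
          have := List.prefix_iff_eq_take.mp hpre
          simpa [hti] using this
        rw [List.take_add] at this
        have : d = (s.drop i).take d.length := List.append_cancel_left this
        exact hmatch (by rw [hslice, ← this])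
    · rw [pvLoopA, pvBuildB]
      have hi' : i = s.length := by omega
      subst hi'
      simp

theorem is_fibonacci_string_spec : Claim_equal_is_fibonacci_string := by
  intro s _
  unfold Spec_is_fibonacci_string is_fibonacci_string is_fibonacci_string_alt
  set cs := s.toList with hcs
  by_cases h3 : cs.length < 3
  · simp [h3, show ¬ (3 ≤ cs.length) by omega]
  · have h3' : 3 ≤ cs.length := by omega
    have htake2 : PySem.List.slice cs none (some 2) = cs.take 2 := by
      simpa using PySem.List.slice_to_natCast cs 2
    by_cases hpre : PySem.List.slice cs none (some 2) ≠ ['0', '1']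
    · -- A: bad prefix → False; B: '01' is not a prefix of cs, so the built t ≠ cs
      simp only [h3, if_pos hpre]
      have hne : pvBuildB cs ['0', '1'] 0 1 ≠ cs := by
        intro habs
        have h01 : (['0', '1'] : List Char) <+: cs := by
          have h := pvBuildB_prefix cs ['0', '1'] 0 1
          rwa [habs] at h
        have h2 : cs.take 2 = ['0', '1'] := by
          simpa using (List.prefix_iff_eq_take.mp h01).symm
        exact hpre (htake2.trans h2)
      simp [hne]
    · rw [ne_eq, not_not] at hpre
      have htk : cs.take 2 = ['0', '1'] := by rw [← htake2, hpre]
      have := pvLoop_eq cs (cs.length - 2) 2 0 1 (by omega) (by omega)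
      rw [htk] at this
      rcases hA : pvLoopA cs 0 1 2 with _ | _
      · have : pvBuildB cs ['0', '1'] 0 1 ≠ cs := by
          intro habs; rw [← this] at habs; rw [hA] at habs; exact Bool.false_ne_true habs
        simp [h3, hpre, hA, this]
      · have : pvBuildB cs ['0', '1'] 0 1 = cs := this.mp hA
        simp [h3, hpre, hA, h3', this]
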